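-- pv_equiv track=rewrite | github.com/ZZZOnline/Side-information | sid1/new_utils.py | datatimenormalizelast
-- ===== SOURCE A (Python) =====
-- from collections import defaultdict
--
-- def datatimenormalizelast(User):
--     User_filted = dict()
--     user_set = set()
--     item_set = set()
--     cate_set = set()
--     time_max = set()
--     #time normalize
--     User_train = defaultdict(list)
--     User_valid = defaultdict(list)
--     User_test = defaultdict(list)
--     for user, items in User.items():
--         User_train[user]=items[:-2]
--         User_valid[user]=[items[-2]]
--         User_test[user]=[items[-1]]
--
--
--
--     for user, datas in User.items():#datas:[item,time,cate]
--         user_set.add(user)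
--         User_filted[user] = datas
--         for data in datas:
--             item_set.add(data[0])
--             cate_set.add(data[1])
--
--
--     item_res_train = dict()
--     cate_res_train = dict()
--     beha_res_train = dict()
--     time_res_train = dict()
--     # in_cateitem_res_train = defaultdict(dict)
--     for user, datas in User_train.items():
--         # catelist_train = defaultdict(list)
--         item_res_train[user] = list(map(lambda x: x[0], datas))
--         cate_res_train[user] = list(map(lambda x: x[1], datas))
--         # time_res_train[user] = list(map(lambda x: x[1], datas))
--         # beha_res_train[user] = list(map(lambda x: x[3], datas))
--         # for data in datas:#data [item,time,cate]
--         #     catelist_train[data[2]].append([data[0],data[1]])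
--         # in_cateitem_res_train[user] = catelist_train
--     item_res_valid = dict()
--     cate_res_valid = dict()
--     beha_res_valid = dict()
--     time_res_valid = dict()
--     # in_cateitem_res_valid = defaultdict(dict)
--     for user, datas in User_valid.items():
--         # catelist_valid = defaultdict(list)
--         item_res_valid[user] = list(map(lambda x: x[0], datas))
--         cate_res_valid[user] = list(map(lambda x: x[1], datas))
--         # time_res_valid[user] = list(map(lambda x: x[1], datas))
--         # beha_res_valid[user] = list(map(lambda x: x[3], datas))
--         # for data in datas:#data [item,time,cate]
--         #     catelist_valid[data[2]].append([data[0],data[1]])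
--         # in_cateitem_res_valid[user] = catelist_valid
--     item_res_test = dict()
--     cate_res_test = dict()
--     beha_res_test = dict()
--     time_res_test = dict()
--     # in_cateitem_res_test = defaultdict(dict)
--     for user, datas in User_test.items():
--         # catelist_test = defaultdict(list)
--         item_res_test[user] = list(map(lambda x: x[0], datas))
--         cate_res_test[user] = list(map(lambda x: x[1], datas))
--         # time_res_test[user] = list(map(lambda x: x[1], datas))
--         # beha_res_test[user] = list(map(lambda x: x[3], datas))
--
--
--     return item_res_train, cate_res_train, item_res_valid, cate_res_valid, item_res_test, cate_res_test, len(user_set), len(item_set), len(cate_set)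
-- ===== SOURCE B (Python) =====
-- def datatimenormalizelast(User):
--     # One pass over User.items(): build the six result dicts directly and the
--     # item/cate sets in the same loop; the user count is just len(User).
--     item_res_train = {}
--     cate_res_train = {}
--     item_res_valid = {}
--     cate_res_valid = {}
--     item_res_test = {}
--     cate_res_test = {}
--     item_set = set()
--     cate_set = set()
--     for user, datas in User.items():
--         train = datas[:-2]
--         item_res_train[user] = [x[0] for x in train]
--         cate_res_train[user] = [x[1] for x in train]
--         item_res_valid[user] = [datas[-2][0]]
--         cate_res_valid[user] = [datas[-2][1]]
--         item_res_test[user] = [datas[-1][0]]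
--         cate_res_test[user] = [datas[-1][1]]
--         for d in datas:
--             item_set.add(d[0])
--             cate_set.add(d[1])
--     return (item_res_train, cate_res_train, item_res_valid, cate_res_valid,
--             item_res_test, cate_res_test, len(User), len(item_set), len(cate_set))
-- ===== Notes on version B (the rewrite author's own statement) =====
-- stated objective: simpler
-- what changed: Replaces A's four sequential loops and three intermediate defaultdicts (User_train/valid/test, User_filted, user_set) with a single pass over User.items() that writes the six result dicts and the item/cate sets directly and returns len(User) for the user count.
import Mathlib
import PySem

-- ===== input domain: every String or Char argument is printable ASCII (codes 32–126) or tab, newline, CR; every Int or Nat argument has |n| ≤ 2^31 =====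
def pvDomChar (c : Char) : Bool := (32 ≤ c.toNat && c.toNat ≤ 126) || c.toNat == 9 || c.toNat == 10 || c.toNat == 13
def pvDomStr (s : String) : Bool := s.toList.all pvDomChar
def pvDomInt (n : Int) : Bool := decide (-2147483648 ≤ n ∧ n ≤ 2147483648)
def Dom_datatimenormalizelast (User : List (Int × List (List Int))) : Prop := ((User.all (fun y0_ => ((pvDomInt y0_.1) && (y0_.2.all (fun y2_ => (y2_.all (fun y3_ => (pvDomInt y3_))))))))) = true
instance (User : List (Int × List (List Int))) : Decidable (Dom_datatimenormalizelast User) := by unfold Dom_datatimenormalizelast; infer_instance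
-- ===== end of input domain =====

-- B is a single pass over User.items() that builds the six result dicts and the item/cate sets
-- directly (no intermediate User_train/valid/test dicts, user count = len(User)); same return value.

-- ===== PORT A =====
-- first loop: for user, items in User.items(): User_train[user]=items[:-2]; User_valid[user]=[items[-2]]; User_test[user]=[items[-1]]
def aLoop1F (st : PySem.Dict Int (List (List Int)) × PySem.Dict Int (List (List Int)) × PySem.Dict Int (List (List Int)))
    (p : Int × List (List Int)) :
    PySem.Dict Int (List (List Int)) × PySem.Dict Int (List (List Int)) × PySem.Dict Int (List (List Int)) :=
  (st.1.insert p.1 (PySem.List.slice p.2 none (some (-2))),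
   st.2.1.insert p.1 [(PySem.List.pyGet? p.2 (-2)).getD []],
   st.2.2.insert p.1 [(PySem.List.pyGet? p.2 (-1)).getD []])

-- second loop: user_set.add(user); User_filted[user]=datas; inner loop adds data[0]/data[1] to item_set/cate_set
def aLoop2F (st : PySem.Set Int × PySem.Dict Int (List (List Int)) × PySem.Set Int × PySem.Set Int)
    (p : Int × List (List Int)) :
    PySem.Set Int × PySem.Dict Int (List (List Int)) × PySem.Set Int × PySem.Set Int :=
  (PySem.Set.add st.1 p.1,
   st.2.1.insert p.1 p.2,
   p.2.foldl (fun t d => (PySem.Set.add t.1 ((PySem.List.pyGet? d 0).getD 0),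
                          PySem.Set.add t.2 ((PySem.List.pyGet? d 1).getD 0)))
     (st.2.2.1, st.2.2.2))

-- each result loop: item_res[user] = list(map(lambda x: x[0], datas)); cate_res[user] = list(map(lambda x: x[1], datas))
def aResF (st : PySem.Dict Int (List Int) × PySem.Dict Int (List Int)) (p : Int × List (List Int)) :
    PySem.Dict Int (List Int) × PySem.Dict Int (List Int) :=
  (st.1.insert p.1 (p.2.map (fun x => (PySem.List.pyGet? x 0).getD 0)),
   st.2.insert p.1 (p.2.map (fun x => (PySem.List.pyGet? x 1).getD 0)))

def aTVT (User : List (Int × List (List Int))) :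
    PySem.Dict Int (List (List Int)) × PySem.Dict Int (List (List Int)) × PySem.Dict Int (List (List Int)) :=
  User.foldl aLoop1F (PySem.Dict.empty, PySem.Dict.empty, PySem.Dict.empty)

def aSETS (User : List (Int × List (List Int))) :
    PySem.Set Int × PySem.Dict Int (List (List Int)) × PySem.Set Int × PySem.Set Int :=
  User.foldl aLoop2F (PySem.Set.empty, PySem.Dict.empty, PySem.Set.empty, PySem.Set.empty)

def aRES (l : List (Int × List (List Int))) : PySem.Dict Int (List Int) × PySem.Dict Int (List Int) :=
  l.foldl aResF (PySem.Dict.empty, PySem.Dict.empty)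

def datatimenormalizelast (User : List (Int × List (List Int))) : (List (Int × List Int)) × (List (Int × List Int)) × (List (Int × List Int)) × (List (Int × List Int)) × (List (Int × List Int)) × (List (Int × List Int)) × Int × Int × Int :=
  ((aRES (aTVT User).1.items).1.items,
   (aRES (aTVT User).1.items).2.items,
   (aRES (aTVT User).2.1.items).1.items,
   (aRES (aTVT User).2.1.items).2.items,
   (aRES (aTVT User).2.2.items).1.items,
   (aRES (aTVT User).2.2.items).2.items,
   PySem.Set.len (aSETS User).1,
   PySem.Set.len (aSETS User).2.2.1,
   PySem.Set.len (aSETS User).2.2.2)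

-- ===== PORT B =====
-- single loop: six result dicts (keys are the distinct users, so each assignment appends) and the two sets
def bLoopF (st : List (Int × List Int) × List (Int × List Int) × List (Int × List Int) × List (Int × List Int) × List (Int × List Int) × List (Int × List Int) × PySem.Set Int × PySem.Set Int)
    (p : Int × List (List Int)) :
    List (Int × List Int) × List (Int × List Int) × List (Int × List Int) × List (Int × List Int) × List (Int × List Int) × List (Int × List Int) × PySem.Set Int × PySem.Set Int :=
  (st.1 ++ [(p.1, (PySem.List.slice p.2 none (some (-2))).map (fun x => (PySem.List.pyGet? x 0).getD 0))],
   st.2.1 ++ [(p.1, (PySem.List.slice p.2 none (some (-2))).map (fun x => (PySem.List.pyGet? x 1).getD 0))],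
   st.2.2.1 ++ [(p.1, [(PySem.List.pyGet? ((PySem.List.pyGet? p.2 (-2)).getD []) 0).getD 0])],
   st.2.2.2.1 ++ [(p.1, [(PySem.List.pyGet? ((PySem.List.pyGet? p.2 (-2)).getD []) 1).getD 0])],
   st.2.2.2.2.1 ++ [(p.1, [(PySem.List.pyGet? ((PySem.List.pyGet? p.2 (-1)).getD []) 0).getD 0])],
   st.2.2.2.2.2.1 ++ [(p.1, [(PySem.List.pyGet? ((PySem.List.pyGet? p.2 (-1)).getD []) 1).getD 0])],
   p.2.foldl (fun t d => (PySem.Set.add t.1 ((PySem.List.pyGet? d 0).getD 0),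
                          PySem.Set.add t.2 ((PySem.List.pyGet? d 1).getD 0)))
     (st.2.2.2.2.2.2.1, st.2.2.2.2.2.2.2))

def bFold (User : List (Int × List (List Int))) :
    List (Int × List Int) × List (Int × List Int) × List (Int × List Int) × List (Int × List Int) × List (Int × List Int) × List (Int × List Int) × PySem.Set Int × PySem.Set Int :=
  User.foldl bLoopF ([], [], [], [], [], [], PySem.Set.empty, PySem.Set.empty)

def datatimenormalizelast_alt (User : List (Int × List (List Int))) : (List (Int × List Int)) × (List (Int × List Int)) × (List (Int × List Int)) × (List (Int × List Int)) × (List (Int × List Int)) × (List (Int × List Int)) × Int × Int × Int :=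
  ((bFold User).1, (bFold User).2.1, (bFold User).2.2.1, (bFold User).2.2.2.1,
   (bFold User).2.2.2.2.1, (bFold User).2.2.2.2.2.1,
   PySem.List.len User,
   PySem.Set.len (bFold User).2.2.2.2.2.2.1,
   PySem.Set.len (bFold User).2.2.2.2.2.2.2)

-- ===== PRECONDITION & SPEC =====
-- Pre_ excludes (a) inputs on which Python A raises IndexError: a user history of length < 2
-- (items[-2]) or an event list of length < 2 (data[1]); (b) association lists with duplicate user
-- keys, which do not represent a Python dict (A's argument is a dict, so its keys are distinct).
def Pre_datatimenormalizelast (User : List (Int × List (List Int))) : Prop :=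
  (User.map (fun p => p.1)).Nodup ∧ ∀ p ∈ User, 2 ≤ p.2.length ∧ ∀ d ∈ p.2, 2 ≤ d.length
instance (User : List (Int × List (List Int))) : Decidable (Pre_datatimenormalizelast User) := by unfold Pre_datatimenormalizelast; infer_instance

def pvWitness_datatimenormalizelast : (List (Int × List (List Int))) :=
  [(1, [[10, 5], [11, 6], [12, 7]]), (2, [[10, 5], [13, 8]])]

def Spec_datatimenormalizelast (User : List (Int × List (List Int))) (out : (List (Int × List Int)) × (List (Int × List Int)) × (List (Int × List Int)) × (List (Int × List Int)) × (List (Int × List Int)) × (List (Int × List Int)) × Int × Int × Int) : Prop := out = datatimenormalizelast_alt User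
instance (User : List (Int × List (List Int))) (out : (List (Int × List Int)) × (List (Int × List Int)) × (List (Int × List Int)) × (List (Int × List Int)) × (List (Int × List Int)) × (List (Int × List Int)) × Int × Int × Int) : Decidable (Spec_datatimenormalizelast User out) := by
  unfold Spec_datatimenormalizelast
  haveI h3 : DecidableEq (List (Int × List Int) × Int × Int × Int) := instDecidableEqProd
  haveI h4 : DecidableEq (List (Int × List Int) × List (Int × List Int) × Int × Int × Int) := instDecidableEqProd
  haveI h5 : DecidableEq (List (Int × List Int) × List (Int × List Int) × List (Int × List Int) × Int × Int × Int) := instDecidableEqProd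
  haveI h6 : DecidableEq (List (Int × List Int) × List (Int × List Int) × List (Int × List Int) × List (Int × List Int) × Int × Int × Int) := instDecidableEqProd
  haveI h7 : DecidableEq (List (Int × List Int) × List (Int × List Int) × List (Int × List Int) × List (Int × List Int) × List (Int × List Int) × Int × Int × Int) := instDecidableEqProd
  exact instDecidableEqProd _ _

-- ===== CLAIM (what is proved, stated in full; the proofs are below) =====
def Claim_equal_datatimenormalizelast : Prop := ∀ (User : List (Int × List (List Int))), Dom_datatimenormalizelast User → Pre_datatimenormalizelast User → Spec_datatimenormalizelast User (datatimenormalizelast User)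

-- ===== LEMMAS AND PROOFS =====

-- splitting a fold over a triple of independently-updated components (derived from PySem.List.foldl_prod_mk)
theorem pvFoldlProd3 {β σ1 σ2 σ3 : Type} (f1 : σ1 → β → σ1) (f2 : σ2 → β → σ2) (f3 : σ3 → β → σ3)
    (l : List β) (a : σ1) (b : σ2) (c : σ3) :
    l.foldl (fun s e => (f1 s.1 e, f2 s.2.1 e, f3 s.2.2 e)) (a, b, c) =
      (l.foldl f1 a, l.foldl f2 b, l.foldl f3 c) :=
  (PySem.List.foldl_prod_mk f1 (fun t e => (f2 t.1 e, f3 t.2 e)) l a (b, c)).trans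
    (congrArg (Prod.mk _) (PySem.List.foldl_prod_mk f2 f3 l b c))

theorem pvFoldlProd7 {β σ1 σ2 σ3 σ4 σ5 σ6 σ7 : Type}
    (f1 : σ1 → β → σ1) (f2 : σ2 → β → σ2) (f3 : σ3 → β → σ3) (f4 : σ4 → β → σ4)
    (f5 : σ5 → β → σ5) (f6 : σ6 → β → σ6) (f7 : σ7 → β → σ7)
    (l : List β) (a : σ1) (b : σ2) (c : σ3) (d : σ4) (e : σ5) (f : σ6) (g : σ7) :
    l.foldl (fun s x => (f1 s.1 x, f2 s.2.1 x, f3 s.2.2.1 x, f4 s.2.2.2.1 x,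
                         f5 s.2.2.2.2.1 x, f6 s.2.2.2.2.2.1 x, f7 s.2.2.2.2.2.2 x))
        (a, b, c, d, e, f, g) =
      (l.foldl f1 a, l.foldl f2 b, l.foldl f3 c, l.foldl f4 d, l.foldl f5 e, l.foldl f6 f, l.foldl f7 g) :=
  (PySem.List.foldl_prod_mk f1
      (fun t x => (f2 t.1 x, f3 t.2.1 x, f4 t.2.2.1 x, f5 t.2.2.2.1 x, f6 t.2.2.2.2.1 x, f7 t.2.2.2.2.2 x))
      l a (b, c, d, e, f, g)).trans
    (congrArg (Prod.mk _)
      ((PySem.List.foldl_prod_mk f2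
          (fun t x => (f3 t.1 x, f4 t.2.1 x, f5 t.2.2.1 x, f6 t.2.2.2.1 x, f7 t.2.2.2.2 x))
          l b (c, d, e, f, g)).trans
        (congrArg (Prod.mk _)
          ((PySem.List.foldl_prod_mk f3
              (fun t x => (f4 t.1 x, f5 t.2.1 x, f6 t.2.2.1 x, f7 t.2.2.2 x)) l c (d, e, f, g)).trans
            (congrArg (Prod.mk _)
              ((PySem.List.foldl_prod_mk f4 (fun t x => (f5 t.1 x, f6 t.2.1 x, f7 t.2.2 x)) l d (e, f, g)).trans
                (congrArg (Prod.mk _) (pvFoldlProd3 f5 f6 f7 l e f g))))))))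

-- a loop whose body is itself a pair-shaped inner fold splits into two nested folds
theorem pvFoldlInnerPair {β γ σ1 σ2 : Type} (k : β → List γ)
    (f : σ1 → γ → σ1) (g : σ2 → γ → σ2) (l : List β) (a : σ1) (b : σ2) :
    l.foldl (fun t p => (k p).foldl (fun t d => (f t.1 d, g t.2 d)) t) (a, b) =
      (l.foldl (fun s p => (k p).foldl f s) a, l.foldl (fun s p => (k p).foldl g s) b) := by
  have h : (fun (t : σ1 × σ2) p => (k p).foldl (fun t d => (f t.1 d, g t.2 d)) t) =
      fun t p => ((k p).foldl f t.1, (k p).foldl g t.2) :=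
    funext fun t => funext fun p => PySem.List.foldl_prod_mk f g (k p) t.1 t.2
  rw [h]
  exact PySem.List.foldl_prod_mk (fun s p => (k p).foldl f s) (fun s p => (k p).foldl g s) l a b

-- a dict built by inserting the (distinct) users of l has items = the corresponding map over l
theorem pvItemsInsertFold {ν : Type} (v : (Int × List (List Int)) → ν) (l : List (Int × List (List Int)))
    (h : (l.map (fun p => p.1)).Nodup) :
    (l.foldl (fun d p => d.insert p.1 (v p)) (PySem.Dict.empty : PySem.Dict Int ν)).items =
      l.map (fun p => (p.1, v p)) := by
  simpa using PySem.Dict.items_foldl_insert_fresh l (fun p => p.1) v PySem.Dict.empty (by simp) h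

theorem pvATVT_eq (User : List (Int × List (List Int))) :
    aTVT User =
      (User.foldl (fun d p => d.insert p.1 (PySem.List.slice p.2 none (some (-2)))) PySem.Dict.empty,
       User.foldl (fun d p => d.insert p.1 [(PySem.List.pyGet? p.2 (-2)).getD []]) PySem.Dict.empty,
       User.foldl (fun d p => d.insert p.1 [(PySem.List.pyGet? p.2 (-1)).getD []]) PySem.Dict.empty) :=
  pvFoldlProd3 (fun (d : PySem.Dict Int (List (List Int))) (p : Int × List (List Int)) => d.insert p.1 (PySem.List.slice p.2 none (some (-2))))
    (fun (d : PySem.Dict Int (List (List Int))) (p : Int × List (List Int)) => d.insert p.1 [(PySem.List.pyGet? p.2 (-2)).getD []])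
    (fun (d : PySem.Dict Int (List (List Int))) (p : Int × List (List Int)) => d.insert p.1 [(PySem.List.pyGet? p.2 (-1)).getD []])
    User PySem.Dict.empty PySem.Dict.empty PySem.Dict.empty

theorem pvASETS_eq (User : List (Int × List (List Int))) :
    aSETS User =
      (User.foldl (fun s p => PySem.Set.add s p.1) PySem.Set.empty,
       User.foldl (fun d p => d.insert p.1 p.2) PySem.Dict.empty,
       User.foldl (fun s p => p.2.foldl (fun s d => PySem.Set.add s ((PySem.List.pyGet? d 0).getD 0)) s) PySem.Set.empty,
       User.foldl (fun s p => p.2.foldl (fun s d => PySem.Set.add s ((PySem.List.pyGet? d 1).getD 0)) s) PySem.Set.empty) := by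
  refine Eq.trans (pvFoldlProd3 (fun (s : PySem.Set Int) (p : Int × List (List Int)) => PySem.Set.add s p.1)
      (fun (d : PySem.Dict Int (List (List Int))) (p : Int × List (List Int)) => d.insert p.1 p.2)
      (fun (t : PySem.Set Int × PySem.Set Int) (p : Int × List (List Int)) =>
        p.2.foldl (fun t d => (PySem.Set.add t.1 ((PySem.List.pyGet? d 0).getD 0),
                               PySem.Set.add t.2 ((PySem.List.pyGet? d 1).getD 0))) t)
      User PySem.Set.empty PySem.Dict.empty (PySem.Set.empty, PySem.Set.empty)) ?_
  rw [pvFoldlInnerPair (fun p : Int × List (List Int) => p.2)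
      (fun s d => PySem.Set.add s ((PySem.List.pyGet? d 0).getD 0))
      (fun s d => PySem.Set.add s ((PySem.List.pyGet? d 1).getD 0)) User PySem.Set.empty PySem.Set.empty]

theorem pvARES_items (l : List (Int × List (List Int))) (h : (l.map (fun p => p.1)).Nodup) :
    (aRES l).1.items = l.map (fun p => (p.1, p.2.map (fun x => (PySem.List.pyGet? x 0).getD 0))) ∧
    (aRES l).2.items = l.map (fun p => (p.1, p.2.map (fun x => (PySem.List.pyGet? x 1).getD 0))) := by
  have hsplit : aRES l =
      (l.foldl (fun d p => d.insert p.1 (p.2.map (fun x => (PySem.List.pyGet? x 0).getD 0))) PySem.Dict.empty,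
       l.foldl (fun d p => d.insert p.1 (p.2.map (fun x => (PySem.List.pyGet? x 1).getD 0))) PySem.Dict.empty) :=
    PySem.List.foldl_prod_mk (fun (d : PySem.Dict Int (List Int)) (p : Int × List (List Int)) => d.insert p.1 (p.2.map (fun x => (PySem.List.pyGet? x 0).getD 0)))
      (fun (d : PySem.Dict Int (List Int)) (p : Int × List (List Int)) => d.insert p.1 (p.2.map (fun x => (PySem.List.pyGet? x 1).getD 0))) l
      PySem.Dict.empty PySem.Dict.empty
  rw [hsplit]
  exact ⟨pvItemsInsertFold _ l h, pvItemsInsertFold _ l h⟩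

theorem pvBFold_eq (User : List (Int × List (List Int))) :
    bFold User =
      (User.map (fun p => (p.1, (PySem.List.slice p.2 none (some (-2))).map (fun x => (PySem.List.pyGet? x 0).getD 0))),
       User.map (fun p => (p.1, (PySem.List.slice p.2 none (some (-2))).map (fun x => (PySem.List.pyGet? x 1).getD 0))),
       User.map (fun p => (p.1, [(PySem.List.pyGet? ((PySem.List.pyGet? p.2 (-2)).getD []) 0).getD 0])),
       User.map (fun p => (p.1, [(PySem.List.pyGet? ((PySem.List.pyGet? p.2 (-2)).getD []) 1).getD 0])),
       User.map (fun p => (p.1, [(PySem.List.pyGet? ((PySem.List.pyGet? p.2 (-1)).getD []) 0).getD 0])),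
       User.map (fun p => (p.1, [(PySem.List.pyGet? ((PySem.List.pyGet? p.2 (-1)).getD []) 1).getD 0])),
       User.foldl (fun s p => p.2.foldl (fun s d => PySem.Set.add s ((PySem.List.pyGet? d 0).getD 0)) s) PySem.Set.empty,
       User.foldl (fun s p => p.2.foldl (fun s d => PySem.Set.add s ((PySem.List.pyGet? d 1).getD 0)) s) PySem.Set.empty) := by
  refine Eq.trans (pvFoldlProd7
      (fun (l : List (Int × List Int)) (p : Int × List (List Int)) => l ++ [(p.1, (PySem.List.slice p.2 none (some (-2))).map (fun x => (PySem.List.pyGet? x 0).getD 0))])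
      (fun (l : List (Int × List Int)) (p : Int × List (List Int)) => l ++ [(p.1, (PySem.List.slice p.2 none (some (-2))).map (fun x => (PySem.List.pyGet? x 1).getD 0))])
      (fun (l : List (Int × List Int)) (p : Int × List (List Int)) => l ++ [(p.1, [(PySem.List.pyGet? ((PySem.List.pyGet? p.2 (-2)).getD []) 0).getD 0])])
      (fun (l : List (Int × List Int)) (p : Int × List (List Int)) => l ++ [(p.1, [(PySem.List.pyGet? ((PySem.List.pyGet? p.2 (-2)).getD []) 1).getD 0])])
      (fun (l : List (Int × List Int)) (p : Int × List (List Int)) => l ++ [(p.1, [(PySem.List.pyGet? ((PySem.List.pyGet? p.2 (-1)).getD []) 0).getD 0])])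
      (fun (l : List (Int × List Int)) (p : Int × List (List Int)) => l ++ [(p.1, [(PySem.List.pyGet? ((PySem.List.pyGet? p.2 (-1)).getD []) 1).getD 0])])
      (fun (t : PySem.Set Int × PySem.Set Int) (p : Int × List (List Int)) =>
        p.2.foldl (fun t d => (PySem.Set.add t.1 ((PySem.List.pyGet? d 0).getD 0),
                               PySem.Set.add t.2 ((PySem.List.pyGet? d 1).getD 0))) t)
      User [] [] [] [] [] [] (PySem.Set.empty, PySem.Set.empty)) ?_
  rw [pvFoldlInnerPair (fun p : Int × List (List Int) => p.2)
      (fun s d => PySem.Set.add s ((PySem.List.pyGet? d 0).getD 0))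
      (fun s d => PySem.Set.add s ((PySem.List.pyGet? d 1).getD 0)) User PySem.Set.empty PySem.Set.empty]
  simp only [PySem.List.foldl_append_singleton_eq_map, List.nil_append]

-- ===== VERDICT =====
theorem datatimenormalizelast_spec : Claim_equal_datatimenormalizelast := by
  intro User _hDom hPre
  obtain ⟨hnd, _hlen⟩ := hPre
  unfold Spec_datatimenormalizelast datatimenormalizelast datatimenormalizelast_alt
  rw [pvATVT_eq, pvASETS_eq, pvBFold_eq]
  have htr := pvItemsInsertFold (fun p => PySem.List.slice p.2 none (some (-2))) User hnd
  have hva := pvItemsInsertFold (fun p => [(PySem.List.pyGet? p.2 (-2)).getD []]) User hnd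
  have hte := pvItemsInsertFold (fun p => [(PySem.List.pyGet? p.2 (-1)).getD []]) User hnd
  simp only at htr hva hte ⊢
  rw [htr, hva, hte]
  have hnd' : ∀ (v : (Int × List (List Int)) → List (List Int)),
      ((User.map (fun p => (p.1, v p))).map (fun p => p.1)).Nodup := by
    intro v
    simpa [List.map_map, Function.comp] using hnd
  obtain ⟨htr0, htr1⟩ := pvARES_items (User.map (fun p => (p.1, PySem.List.slice p.2 none (some (-2))))) (hnd' _)
  obtain ⟨hva0, hva1⟩ := pvARES_items (User.map (fun p => (p.1, [(PySem.List.pyGet? p.2 (-2)).getD []]))) (hnd' _)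
  obtain ⟨hte0, hte1⟩ := pvARES_items (User.map (fun p => (p.1, [(PySem.List.pyGet? p.2 (-1)).getD []]))) (hnd' _)
  rw [htr0, htr1, hva0, hva1, hte0, hte1]
  -- user count: the user_set is exactly the (distinct) keys of User
  have huser : User.foldl (fun s p => PySem.Set.add s p.1) PySem.Set.empty = User.map (fun p => p.1) := by
    rw [← PySem.Set.update_map_eq_foldl_add, PySem.Set.update_empty]
    exact PySem.Set.ofList_eq_self_of_nodup _ hnd
  rw [huser]
  simp [List.map_map, Function.comp, PySem.Set.len, PySem.List.len]
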